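-- pv_equiv track=rewrite | github.com/luna-intelligence/Luna_Tool | modules/phone_lookup.py | get_detailed_carrier_info
-- ===== SOURCE A (Python) =====
-- def get_detailed_carrier_info(phone, country_code):
--     if phone.startswith('+7'):
--         if any(phone.startswith(f'+79{prefix}') for prefix in ['00', '02', '04', '08', '50', '62', '69', '77', '85', '86', '88']):
--             return "MegaFon"
--         elif any(phone.startswith(f'+79{prefix}') for prefix in ['01', '02', '10', '13', '14', '15', '16', '19', '68', '84']):
--             return "MTS"
--         elif any(phone.startswith(f'+79{prefix}') for prefix in ['03', '05', '06', '09', '60', '61', '95', '96', '99']):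
--             return "Beeline"
--         elif any(phone.startswith(f'+79{prefix}') for prefix in ['52', '53', '55', '57', '58', '59', '77', '78', '9']):
--             return "Tele2"
--         elif phone.startswith('+7800'):
--             return "Toll-free number"
--
--     elif phone.startswith('+1'):
--         if phone[2:6] in ['3115', '3128', '3242']:
--             return "Verizon"
--         elif phone[2:6] in ['3145', '3235', '3256']:
--             return "AT&T"
--         elif phone[2:6] in ['3107', '3125', '3237']:
--             return "T-Mobile"
--
--     return None
-- ===== SOURCE B (Python) =====
-- # One flat table of full dialing prefixes; the answer is a longest-prefix match:
-- # try the phone's own prefixes from longest (6) to shortest (4) key length.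
-- _PREFIX_TABLE = {
--     # Russian mobile prefixes "+79XY" (priority overlaps already resolved:
--     # '02' -> MegaFon over MTS, '77' -> MegaFon over Tele2).
--     '+7900': 'MegaFon', '+7902': 'MegaFon', '+7904': 'MegaFon', '+7908': 'MegaFon',
--     '+7950': 'MegaFon', '+7962': 'MegaFon', '+7969': 'MegaFon', '+7977': 'MegaFon',
--     '+7985': 'MegaFon', '+7986': 'MegaFon', '+7988': 'MegaFon',
--     '+7901': 'MTS', '+7910': 'MTS', '+7913': 'MTS', '+7914': 'MTS', '+7915': 'MTS',
--     '+7916': 'MTS', '+7919': 'MTS', '+7968': 'MTS', '+7984': 'MTS',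
--     '+7903': 'Beeline', '+7905': 'Beeline', '+7906': 'Beeline', '+7909': 'Beeline',
--     '+7960': 'Beeline', '+7961': 'Beeline', '+7995': 'Beeline', '+7996': 'Beeline',
--     '+7999': 'Beeline',
--     '+7952': 'Tele2', '+7953': 'Tele2', '+7955': 'Tele2', '+7957': 'Tele2',
--     '+7958': 'Tele2', '+7959': 'Tele2', '+7978': 'Tele2',
--     # one-digit Tele2 family '9' (overridden by the longer Beeline keys above)
--     '+799': 'Tele2',
--     '+7800': 'Toll-free number',
--     # US number blocks "+1" + phone[2:6]
--     '+13115': 'Verizon', '+13128': 'Verizon', '+13242': 'Verizon',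
--     '+13145': 'AT&T', '+13235': 'AT&T', '+13256': 'AT&T',
--     '+13107': 'T-Mobile', '+13125': 'T-Mobile', '+13237': 'T-Mobile',
-- }
--
-- def get_detailed_carrier_info(phone, country_code):
--     for n in range(6, 3, -1):
--         hit = _PREFIX_TABLE.get(phone[:n])
--         if hit is not None:
--             return hit
--     return None
-- ===== Notes on version B (the rewrite author's own statement) =====
-- stated objective: alternative
-- what changed: Replaced A's branch cascade (four any()-scans over two-digit suffix lists inside a '+7' branch, plus separate '+7800' and '+1' slice-membership branches) by a generic longest-prefix-match: one flat table keyed by the full dialing prefix ('+7900', ..., '+799', '+7800', '+13115', ...) probed with the phone's own prefixes phone[:6], phone[:5], phone[:4], longest first; priority overlaps ('02', '77', '9x') are pre-resolved in the table.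
import Mathlib
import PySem

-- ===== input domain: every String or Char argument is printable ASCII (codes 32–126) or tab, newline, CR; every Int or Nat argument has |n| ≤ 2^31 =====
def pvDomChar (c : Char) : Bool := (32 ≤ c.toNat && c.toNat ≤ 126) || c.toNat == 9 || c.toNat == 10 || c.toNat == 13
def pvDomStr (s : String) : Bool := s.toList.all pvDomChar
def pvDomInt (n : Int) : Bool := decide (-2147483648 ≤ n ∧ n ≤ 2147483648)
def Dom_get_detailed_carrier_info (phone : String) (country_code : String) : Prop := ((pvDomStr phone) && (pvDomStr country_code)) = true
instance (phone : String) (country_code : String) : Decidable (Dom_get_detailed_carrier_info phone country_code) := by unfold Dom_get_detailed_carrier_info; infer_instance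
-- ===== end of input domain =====

-- B replaces A's branch cascade of any()-scans by a generic longest-prefix match: one flat
-- table of full dialing prefixes, probed with the phone's own prefixes from length 6 down to 4.

-- ===== PORT A =====
def pvMegafon : List String := ["00", "02", "04", "08", "50", "62", "69", "77", "85", "86", "88"]
def pvMts : List String := ["01", "02", "10", "13", "14", "15", "16", "19", "68", "84"]
def pvBeeline : List String := ["03", "05", "06", "09", "60", "61", "95", "96", "99"]
def pvTele2 : List String := ["52", "53", "55", "57", "58", "59", "77", "78", "9"]

def get_detailed_carrier_info (phone : String) (country_code : String) : Option String :=
  if PySem.Str.startswith phone "+7" then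
    if pvMegafon.any (fun p => PySem.Str.startswith phone ("+79" ++ p)) then some "MegaFon"
    else if pvMts.any (fun p => PySem.Str.startswith phone ("+79" ++ p)) then some "MTS"
    else if pvBeeline.any (fun p => PySem.Str.startswith phone ("+79" ++ p)) then some "Beeline"
    else if pvTele2.any (fun p => PySem.Str.startswith phone ("+79" ++ p)) then some "Tele2"
    else if PySem.Str.startswith phone "+7800" then some "Toll-free number"
    else none
  else if PySem.Str.startswith phone "+1" then
    if ["3115", "3128", "3242"].contains (PySem.Str.slice phone (some 2) (some 6)) then some "Verizon"
    else if ["3145", "3235", "3256"].contains (PySem.Str.slice phone (some 2) (some 6)) then some "AT&T"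
    else if ["3107", "3125", "3237"].contains (PySem.Str.slice phone (some 2) (some 6)) then some "T-Mobile"
    else none
  else none

-- ===== PORT B =====
def pvPrefixTable : PySem.Dict String String := PySem.Dict.mk
  [("+7900", "MegaFon"), ("+7902", "MegaFon"), ("+7904", "MegaFon"), ("+7908", "MegaFon"),
   ("+7950", "MegaFon"), ("+7962", "MegaFon"), ("+7969", "MegaFon"), ("+7977", "MegaFon"),
   ("+7985", "MegaFon"), ("+7986", "MegaFon"), ("+7988", "MegaFon"),
   ("+7901", "MTS"), ("+7910", "MTS"), ("+7913", "MTS"), ("+7914", "MTS"), ("+7915", "MTS"),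
   ("+7916", "MTS"), ("+7919", "MTS"), ("+7968", "MTS"), ("+7984", "MTS"),
   ("+7903", "Beeline"), ("+7905", "Beeline"), ("+7906", "Beeline"), ("+7909", "Beeline"),
   ("+7960", "Beeline"), ("+7961", "Beeline"), ("+7995", "Beeline"), ("+7996", "Beeline"),
   ("+7999", "Beeline"),
   ("+7952", "Tele2"), ("+7953", "Tele2"), ("+7955", "Tele2"), ("+7957", "Tele2"),
   ("+7958", "Tele2"), ("+7959", "Tele2"), ("+7978", "Tele2"),
   ("+799", "Tele2"),
   ("+7800", "Toll-free number"),
   ("+13115", "Verizon"), ("+13128", "Verizon"), ("+13242", "Verizon"),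
   ("+13145", "AT&T"), ("+13235", "AT&T"), ("+13256", "AT&T"),
   ("+13107", "T-Mobile"), ("+13125", "T-Mobile"), ("+13237", "T-Mobile")]

-- the 'for n in range(6, 3, -1): … return hit' loop, with its early return
def pvLoop (ns : List Int) (phone : String) : Option String :=
  match ns with
  | [] => none
  | n :: rest =>
    match pvPrefixTable.get? (PySem.Str.slice phone none (some n)) with
    | some hit => some hit
    | none => pvLoop rest phone

def get_detailed_carrier_info_alt (phone : String) (country_code : String) : Option String :=
  pvLoop (PySem.List.pyRange 6 3 (-1)) phone

-- ===== PRECONDITION & SPEC =====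
def Spec_get_detailed_carrier_info (phone : String) (country_code : String) (out : Option String) : Prop := out = get_detailed_carrier_info_alt phone country_code
instance (phone : String) (country_code : String) (out : Option String) : Decidable (Spec_get_detailed_carrier_info phone country_code out) := by unfold Spec_get_detailed_carrier_info; infer_instance

-- ===== CLAIM (what is proved, stated in full; the proofs are below) =====
def Claim_equal_get_detailed_carrier_info : Prop := ∀ (phone : String) (country_code : String), Dom_get_detailed_carrier_info phone country_code → Spec_get_detailed_carrier_info phone country_code (get_detailed_carrier_info phone country_code)


-- ===== LEMMAS AND PROOFS =====


theorem pv_eq_ofList (s : String) (l : List Char) (h : s.toList = l) : s = String.ofList l := by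
  subst h; exact (String.ofList_toList).symm

theorem pv_beq_ofList_r (s : String) (l : List Char) : (s == String.ofList l) = (s.toList == l) := by
  apply Bool.eq_iff_iff.mpr
  simp only [beq_iff_eq]
  constructor
  · intro h; rw [h]; simp
  · intro h; exact pv_eq_ofList s l h

theorem pv_ofList_beq (l : List Char) (s : String) : (String.ofList l == s) = (s.toList == l) := by
  apply Bool.eq_iff_iff.mpr
  simp only [beq_iff_eq]
  constructor
  · intro h; rw [← h]; simp
  · intro h; exact (pv_eq_ofList s l h).symm

theorem pv_slice_take (l : List Char) (n : Nat) :
    PySem.Str.slice (String.ofList l) none (some (n : Int)) = String.ofList (l.take n) := by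
  apply pv_eq_ofList
  first
  | simp [PySem.Str.toList_slice, PySem.Chars.slice, PySem.List.slice_to_natCast]
  | simp [PySem.Str.slice, pysem]

theorem pv_slice_drop_take (l : List Char) (a b : Nat) :
    PySem.Str.slice (String.ofList l) (some (a : Int)) (some (b : Int)) = String.ofList ((l.drop a).take (b - a)) := by
  apply pv_eq_ofList
  first
  | simp [PySem.Str.toList_slice, PySem.Chars.slice, PySem.List.slice_natCast]
  | simp [PySem.Str.slice, pysem]

theorem pv_range : PySem.List.pyRange 6 3 (-1) = [6, 5, 4] := by decide

theorem pv_alt_unfold (phone : String) (cc : String) :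
    get_detailed_carrier_info_alt phone cc =
      (match pvPrefixTable.get? (PySem.Str.slice phone none (some 6)) with
       | some hit => some hit
       | none => match pvPrefixTable.get? (PySem.Str.slice phone none (some 5)) with
         | some hit => some hit
         | none => match pvPrefixTable.get? (PySem.Str.slice phone none (some 4)) with
           | some hit => some hit
           | none => none) := by
  rw [get_detailed_carrier_info_alt, pv_range]
  rfl

theorem pvK0 : ("+7900" : String).toList = ['+', '7', '9', '0', '0'] := rfl
theorem pvK1 : ("+7902" : String).toList = ['+', '7', '9', '0', '2'] := rfl
theorem pvK2 : ("+7904" : String).toList = ['+', '7', '9', '0', '4'] := rfl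
theorem pvK3 : ("+7908" : String).toList = ['+', '7', '9', '0', '8'] := rfl
theorem pvK4 : ("+7950" : String).toList = ['+', '7', '9', '5', '0'] := rfl
theorem pvK5 : ("+7962" : String).toList = ['+', '7', '9', '6', '2'] := rfl
theorem pvK6 : ("+7969" : String).toList = ['+', '7', '9', '6', '9'] := rfl
theorem pvK7 : ("+7977" : String).toList = ['+', '7', '9', '7', '7'] := rfl
theorem pvK8 : ("+7985" : String).toList = ['+', '7', '9', '8', '5'] := rfl
theorem pvK9 : ("+7986" : String).toList = ['+', '7', '9', '8', '6'] := rfl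
theorem pvK10 : ("+7988" : String).toList = ['+', '7', '9', '8', '8'] := rfl
theorem pvK11 : ("+7901" : String).toList = ['+', '7', '9', '0', '1'] := rfl
theorem pvK12 : ("+7910" : String).toList = ['+', '7', '9', '1', '0'] := rfl
theorem pvK13 : ("+7913" : String).toList = ['+', '7', '9', '1', '3'] := rfl
theorem pvK14 : ("+7914" : String).toList = ['+', '7', '9', '1', '4'] := rfl
theorem pvK15 : ("+7915" : String).toList = ['+', '7', '9', '1', '5'] := rfl
theorem pvK16 : ("+7916" : String).toList = ['+', '7', '9', '1', '6'] := rfl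
theorem pvK17 : ("+7919" : String).toList = ['+', '7', '9', '1', '9'] := rfl
theorem pvK18 : ("+7968" : String).toList = ['+', '7', '9', '6', '8'] := rfl
theorem pvK19 : ("+7984" : String).toList = ['+', '7', '9', '8', '4'] := rfl
theorem pvK20 : ("+7903" : String).toList = ['+', '7', '9', '0', '3'] := rfl
theorem pvK21 : ("+7905" : String).toList = ['+', '7', '9', '0', '5'] := rfl
theorem pvK22 : ("+7906" : String).toList = ['+', '7', '9', '0', '6'] := rfl
theorem pvK23 : ("+7909" : String).toList = ['+', '7', '9', '0', '9'] := rfl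
theorem pvK24 : ("+7960" : String).toList = ['+', '7', '9', '6', '0'] := rfl
theorem pvK25 : ("+7961" : String).toList = ['+', '7', '9', '6', '1'] := rfl
theorem pvK26 : ("+7995" : String).toList = ['+', '7', '9', '9', '5'] := rfl
theorem pvK27 : ("+7996" : String).toList = ['+', '7', '9', '9', '6'] := rfl
theorem pvK28 : ("+7999" : String).toList = ['+', '7', '9', '9', '9'] := rfl
theorem pvK29 : ("+7952" : String).toList = ['+', '7', '9', '5', '2'] := rfl
theorem pvK30 : ("+7953" : String).toList = ['+', '7', '9', '5', '3'] := rfl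
theorem pvK31 : ("+7955" : String).toList = ['+', '7', '9', '5', '5'] := rfl
theorem pvK32 : ("+7957" : String).toList = ['+', '7', '9', '5', '7'] := rfl
theorem pvK33 : ("+7958" : String).toList = ['+', '7', '9', '5', '8'] := rfl
theorem pvK34 : ("+7959" : String).toList = ['+', '7', '9', '5', '9'] := rfl
theorem pvK35 : ("+7978" : String).toList = ['+', '7', '9', '7', '8'] := rfl
theorem pvK36 : ("+799" : String).toList = ['+', '7', '9', '9'] := rfl
theorem pvK37 : ("+7800" : String).toList = ['+', '7', '8', '0', '0'] := rfl
theorem pvK38 : ("+13115" : String).toList = ['+', '1', '3', '1', '1', '5'] := rfl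
theorem pvK39 : ("+13128" : String).toList = ['+', '1', '3', '1', '2', '8'] := rfl
theorem pvK40 : ("+13242" : String).toList = ['+', '1', '3', '2', '4', '2'] := rfl
theorem pvK41 : ("+13145" : String).toList = ['+', '1', '3', '1', '4', '5'] := rfl
theorem pvK42 : ("+13235" : String).toList = ['+', '1', '3', '2', '3', '5'] := rfl
theorem pvK43 : ("+13256" : String).toList = ['+', '1', '3', '2', '5', '6'] := rfl
theorem pvK44 : ("+13107" : String).toList = ['+', '1', '3', '1', '0', '7'] := rfl
theorem pvK45 : ("+13125" : String).toList = ['+', '1', '3', '1', '2', '5'] := rfl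
theorem pvK46 : ("+13237" : String).toList = ['+', '1', '3', '2', '3', '7'] := rfl

def pvTableC (l : List Char) : Option String :=
  if (['+', '7', '9', '0', '0'] == l) then some "MegaFon"
  else  if (['+', '7', '9', '0', '2'] == l) then some "MegaFon"
  else  if (['+', '7', '9', '0', '4'] == l) then some "MegaFon"
  else  if (['+', '7', '9', '0', '8'] == l) then some "MegaFon"
  else  if (['+', '7', '9', '5', '0'] == l) then some "MegaFon"
  else  if (['+', '7', '9', '6', '2'] == l) then some "MegaFon"
  else  if (['+', '7', '9', '6', '9'] == l) then some "MegaFon"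
  else  if (['+', '7', '9', '7', '7'] == l) then some "MegaFon"
  else  if (['+', '7', '9', '8', '5'] == l) then some "MegaFon"
  else  if (['+', '7', '9', '8', '6'] == l) then some "MegaFon"
  else  if (['+', '7', '9', '8', '8'] == l) then some "MegaFon"
  else  if (['+', '7', '9', '0', '1'] == l) then some "MTS"
  else  if (['+', '7', '9', '1', '0'] == l) then some "MTS"
  else  if (['+', '7', '9', '1', '3'] == l) then some "MTS"
  else  if (['+', '7', '9', '1', '4'] == l) then some "MTS"
  else  if (['+', '7', '9', '1', '5'] == l) then some "MTS"
  else  if (['+', '7', '9', '1', '6'] == l) then some "MTS"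
  else  if (['+', '7', '9', '1', '9'] == l) then some "MTS"
  else  if (['+', '7', '9', '6', '8'] == l) then some "MTS"
  else  if (['+', '7', '9', '8', '4'] == l) then some "MTS"
  else  if (['+', '7', '9', '0', '3'] == l) then some "Beeline"
  else  if (['+', '7', '9', '0', '5'] == l) then some "Beeline"
  else  if (['+', '7', '9', '0', '6'] == l) then some "Beeline"
  else  if (['+', '7', '9', '0', '9'] == l) then some "Beeline"
  else  if (['+', '7', '9', '6', '0'] == l) then some "Beeline"
  else  if (['+', '7', '9', '6', '1'] == l) then some "Beeline"
  else  if (['+', '7', '9', '9', '5'] == l) then some "Beeline"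
  else  if (['+', '7', '9', '9', '6'] == l) then some "Beeline"
  else  if (['+', '7', '9', '9', '9'] == l) then some "Beeline"
  else  if (['+', '7', '9', '5', '2'] == l) then some "Tele2"
  else  if (['+', '7', '9', '5', '3'] == l) then some "Tele2"
  else  if (['+', '7', '9', '5', '5'] == l) then some "Tele2"
  else  if (['+', '7', '9', '5', '7'] == l) then some "Tele2"
  else  if (['+', '7', '9', '5', '8'] == l) then some "Tele2"
  else  if (['+', '7', '9', '5', '9'] == l) then some "Tele2"
  else  if (['+', '7', '9', '7', '8'] == l) then some "Tele2"
  else  if (['+', '7', '9', '9'] == l) then some "Tele2"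
  else  if (['+', '7', '8', '0', '0'] == l) then some "Toll-free number"
  else  if (['+', '1', '3', '1', '1', '5'] == l) then some "Verizon"
  else  if (['+', '1', '3', '1', '2', '8'] == l) then some "Verizon"
  else  if (['+', '1', '3', '2', '4', '2'] == l) then some "Verizon"
  else  if (['+', '1', '3', '1', '4', '5'] == l) then some "AT&T"
  else  if (['+', '1', '3', '2', '3', '5'] == l) then some "AT&T"
  else  if (['+', '1', '3', '2', '5', '6'] == l) then some "AT&T"
  else  if (['+', '1', '3', '1', '0', '7'] == l) then some "T-Mobile"
  else  if (['+', '1', '3', '1', '2', '5'] == l) then some "T-Mobile"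
  else  if (['+', '1', '3', '2', '3', '7'] == l) then some "T-Mobile"
  else none

theorem pv_table (l : List Char) : pvPrefixTable.get? (String.ofList l) = pvTableC l := by
  simp only [pvPrefixTable, PySem.Dict.get?_mk_cons, pv_beq_ofList_r, pvK0, pvK1, pvK2, pvK3, pvK4, pvK5, pvK6, pvK7, pvK8, pvK9, pvK10, pvK11, pvK12, pvK13, pvK14, pvK15, pvK16, pvK17, pvK18, pvK19, pvK20, pvK21, pvK22, pvK23, pvK24, pvK25, pvK26, pvK27, pvK28, pvK29, pvK30, pvK31, pvK32, pvK33, pvK34, pvK35, pvK36, pvK37, pvK38, pvK39, pvK40, pvK41, pvK42, pvK43, pvK44, pvK45, pvK46, pvTableC]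
  first
  | rfl
  | simp [PySem.Dict.get?]

theorem pv_sl6_0 :
    PySem.Str.slice (String.ofList ([] : List Char)) none (some 6) = String.ofList [] := by
  have h := pv_slice_take ([] : List Char) 6
  first | exact h | (rw [h])
theorem pv_sl5_0 :
    PySem.Str.slice (String.ofList ([] : List Char)) none (some 5) = String.ofList [] := by
  have h := pv_slice_take ([] : List Char) 5
  first | exact h | (rw [h])
theorem pv_sl4_0 :
    PySem.Str.slice (String.ofList ([] : List Char)) none (some 4) = String.ofList [] := by
  have h := pv_slice_take ([] : List Char) 4
  first | exact h | (rw [h])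
theorem pv_s26_0 :
    PySem.Str.slice (String.ofList ([] : List Char)) (some 2) (some 6) = String.ofList [] := by
  have h := pv_slice_drop_take ([] : List Char) 2 6
  first | exact h | (rw [h])

theorem pv_sl6_1 (c0 : Char) :
    PySem.Str.slice (String.ofList [c0]) none (some 6) = String.ofList [c0] := by
  have h := pv_slice_take [c0] 6
  first | exact h | (rw [h])
theorem pv_sl5_1 (c0 : Char) :
    PySem.Str.slice (String.ofList [c0]) none (some 5) = String.ofList [c0] := by
  have h := pv_slice_take [c0] 5
  first | exact h | (rw [h])
theorem pv_sl4_1 (c0 : Char) :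
    PySem.Str.slice (String.ofList [c0]) none (some 4) = String.ofList [c0] := by
  have h := pv_slice_take [c0] 4
  first | exact h | (rw [h])
theorem pv_s26_1 (c0 : Char) :
    PySem.Str.slice (String.ofList [c0]) (some 2) (some 6) = String.ofList [] := by
  have h := pv_slice_drop_take [c0] 2 6
  first | exact h | (rw [h])

theorem pv_sl6_2 (c0 c1 : Char) :
    PySem.Str.slice (String.ofList [c0, c1]) none (some 6) = String.ofList [c0, c1] := by
  have h := pv_slice_take [c0, c1] 6
  first | exact h | (rw [h])
theorem pv_sl5_2 (c0 c1 : Char) :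
    PySem.Str.slice (String.ofList [c0, c1]) none (some 5) = String.ofList [c0, c1] := by
  have h := pv_slice_take [c0, c1] 5
  first | exact h | (rw [h])
theorem pv_sl4_2 (c0 c1 : Char) :
    PySem.Str.slice (String.ofList [c0, c1]) none (some 4) = String.ofList [c0, c1] := by
  have h := pv_slice_take [c0, c1] 4
  first | exact h | (rw [h])
theorem pv_s26_2 (c0 c1 : Char) :
    PySem.Str.slice (String.ofList [c0, c1]) (some 2) (some 6) = String.ofList [] := by
  have h := pv_slice_drop_take [c0, c1] 2 6
  first | exact h | (rw [h])

theorem pv_sl6_3 (c0 c1 c2 : Char) :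
    PySem.Str.slice (String.ofList [c0, c1, c2]) none (some 6) = String.ofList [c0, c1, c2] := by
  have h := pv_slice_take [c0, c1, c2] 6
  first | exact h | (rw [h])
theorem pv_sl5_3 (c0 c1 c2 : Char) :
    PySem.Str.slice (String.ofList [c0, c1, c2]) none (some 5) = String.ofList [c0, c1, c2] := by
  have h := pv_slice_take [c0, c1, c2] 5
  first | exact h | (rw [h])
theorem pv_sl4_3 (c0 c1 c2 : Char) :
    PySem.Str.slice (String.ofList [c0, c1, c2]) none (some 4) = String.ofList [c0, c1, c2] := by
  have h := pv_slice_take [c0, c1, c2] 4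
  first | exact h | (rw [h])
theorem pv_s26_3 (c0 c1 c2 : Char) :
    PySem.Str.slice (String.ofList [c0, c1, c2]) (some 2) (some 6) = String.ofList [c2] := by
  have h := pv_slice_drop_take [c0, c1, c2] 2 6
  first | exact h | (rw [h])

theorem pv_sl6_4 (c0 c1 c2 c3 : Char) :
    PySem.Str.slice (String.ofList [c0, c1, c2, c3]) none (some 6) = String.ofList [c0, c1, c2, c3] := by
  have h := pv_slice_take [c0, c1, c2, c3] 6
  first | exact h | (rw [h])
theorem pv_sl5_4 (c0 c1 c2 c3 : Char) :
    PySem.Str.slice (String.ofList [c0, c1, c2, c3]) none (some 5) = String.ofList [c0, c1, c2, c3] := by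
  have h := pv_slice_take [c0, c1, c2, c3] 5
  first | exact h | (rw [h])
theorem pv_sl4_4 (c0 c1 c2 c3 : Char) :
    PySem.Str.slice (String.ofList [c0, c1, c2, c3]) none (some 4) = String.ofList [c0, c1, c2, c3] := by
  have h := pv_slice_take [c0, c1, c2, c3] 4
  first | exact h | (rw [h])
theorem pv_s26_4 (c0 c1 c2 c3 : Char) :
    PySem.Str.slice (String.ofList [c0, c1, c2, c3]) (some 2) (some 6) = String.ofList [c2, c3] := by
  have h := pv_slice_drop_take [c0, c1, c2, c3] 2 6
  first | exact h | (rw [h])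

theorem pv_sl6_5 (c0 c1 c2 c3 c4 : Char) :
    PySem.Str.slice (String.ofList [c0, c1, c2, c3, c4]) none (some 6) = String.ofList [c0, c1, c2, c3, c4] := by
  have h := pv_slice_take [c0, c1, c2, c3, c4] 6
  first | exact h | (rw [h])
theorem pv_sl5_5 (c0 c1 c2 c3 c4 : Char) :
    PySem.Str.slice (String.ofList [c0, c1, c2, c3, c4]) none (some 5) = String.ofList [c0, c1, c2, c3, c4] := by
  have h := pv_slice_take [c0, c1, c2, c3, c4] 5
  first | exact h | (rw [h])
theorem pv_sl4_5 (c0 c1 c2 c3 c4 : Char) :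
    PySem.Str.slice (String.ofList [c0, c1, c2, c3, c4]) none (some 4) = String.ofList [c0, c1, c2, c3] := by
  have h := pv_slice_take [c0, c1, c2, c3, c4] 4
  first | exact h | (rw [h])
theorem pv_s26_5 (c0 c1 c2 c3 c4 : Char) :
    PySem.Str.slice (String.ofList [c0, c1, c2, c3, c4]) (some 2) (some 6) = String.ofList [c2, c3, c4] := by
  have h := pv_slice_drop_take [c0, c1, c2, c3, c4] 2 6
  first | exact h | (rw [h])

theorem pv_sl6_6 (c0 c1 c2 c3 c4 c5 : Char) (r : List Char) :
    PySem.Str.slice (String.ofList (c0::c1::c2::c3::c4::c5::r)) none (some 6) = String.ofList [c0, c1, c2, c3, c4, c5] := by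
  have h := pv_slice_take (c0::c1::c2::c3::c4::c5::r) 6
  first | exact h | (rw [h])
theorem pv_sl5_6 (c0 c1 c2 c3 c4 c5 : Char) (r : List Char) :
    PySem.Str.slice (String.ofList (c0::c1::c2::c3::c4::c5::r)) none (some 5) = String.ofList [c0, c1, c2, c3, c4] := by
  have h := pv_slice_take (c0::c1::c2::c3::c4::c5::r) 5
  first | exact h | (rw [h])
theorem pv_sl4_6 (c0 c1 c2 c3 c4 c5 : Char) (r : List Char) :
    PySem.Str.slice (String.ofList (c0::c1::c2::c3::c4::c5::r)) none (some 4) = String.ofList [c0, c1, c2, c3] := by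
  have h := pv_slice_take (c0::c1::c2::c3::c4::c5::r) 4
  first | exact h | (rw [h])
theorem pv_s26_6 (c0 c1 c2 c3 c4 c5 : Char) (r : List Char) :
    PySem.Str.slice (String.ofList (c0::c1::c2::c3::c4::c5::r)) (some 2) (some 6) = String.ofList [c2, c3, c4, c5] := by
  have h := pv_slice_drop_take (c0::c1::c2::c3::c4::c5::r) 2 6
  first | exact h | (rw [h])

theorem pvA0 : ("+79" ++ "00" : String) = "+7900" := rfl
theorem pvA1 : ("+79" ++ "01" : String) = "+7901" := rfl
theorem pvA2 : ("+79" ++ "02" : String) = "+7902" := rfl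
theorem pvA3 : ("+79" ++ "03" : String) = "+7903" := rfl
theorem pvA4 : ("+79" ++ "04" : String) = "+7904" := rfl
theorem pvA5 : ("+79" ++ "05" : String) = "+7905" := rfl
theorem pvA6 : ("+79" ++ "06" : String) = "+7906" := rfl
theorem pvA7 : ("+79" ++ "08" : String) = "+7908" := rfl
theorem pvA8 : ("+79" ++ "09" : String) = "+7909" := rfl
theorem pvA9 : ("+79" ++ "10" : String) = "+7910" := rfl
theorem pvA10 : ("+79" ++ "13" : String) = "+7913" := rfl
theorem pvA11 : ("+79" ++ "14" : String) = "+7914" := rfl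
theorem pvA12 : ("+79" ++ "15" : String) = "+7915" := rfl
theorem pvA13 : ("+79" ++ "16" : String) = "+7916" := rfl
theorem pvA14 : ("+79" ++ "19" : String) = "+7919" := rfl
theorem pvA15 : ("+79" ++ "50" : String) = "+7950" := rfl
theorem pvA16 : ("+79" ++ "52" : String) = "+7952" := rfl
theorem pvA17 : ("+79" ++ "53" : String) = "+7953" := rfl
theorem pvA18 : ("+79" ++ "55" : String) = "+7955" := rfl
theorem pvA19 : ("+79" ++ "57" : String) = "+7957" := rfl
theorem pvA20 : ("+79" ++ "58" : String) = "+7958" := rfl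
theorem pvA21 : ("+79" ++ "59" : String) = "+7959" := rfl
theorem pvA22 : ("+79" ++ "60" : String) = "+7960" := rfl
theorem pvA23 : ("+79" ++ "61" : String) = "+7961" := rfl
theorem pvA24 : ("+79" ++ "62" : String) = "+7962" := rfl
theorem pvA25 : ("+79" ++ "68" : String) = "+7968" := rfl
theorem pvA26 : ("+79" ++ "69" : String) = "+7969" := rfl
theorem pvA27 : ("+79" ++ "77" : String) = "+7977" := rfl
theorem pvA28 : ("+79" ++ "78" : String) = "+7978" := rfl
theorem pvA29 : ("+79" ++ "84" : String) = "+7984" := rfl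
theorem pvA30 : ("+79" ++ "85" : String) = "+7985" := rfl
theorem pvA31 : ("+79" ++ "86" : String) = "+7986" := rfl
theorem pvA32 : ("+79" ++ "88" : String) = "+7988" := rfl
theorem pvA33 : ("+79" ++ "9" : String) = "+799" := rfl
theorem pvA34 : ("+79" ++ "95" : String) = "+7995" := rfl
theorem pvA35 : ("+79" ++ "96" : String) = "+7996" := rfl
theorem pvA36 : ("+79" ++ "99" : String) = "+7999" := rfl

theorem pvP0 : ("+1" : String).toList = ['+', '1'] := rfl
theorem pvP1 : ("+7" : String).toList = ['+', '7'] := rfl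
theorem pvP2 : ("+7800" : String).toList = ['+', '7', '8', '0', '0'] := rfl
theorem pvP3 : ("+7900" : String).toList = ['+', '7', '9', '0', '0'] := rfl
theorem pvP4 : ("+7901" : String).toList = ['+', '7', '9', '0', '1'] := rfl
theorem pvP5 : ("+7902" : String).toList = ['+', '7', '9', '0', '2'] := rfl
theorem pvP6 : ("+7903" : String).toList = ['+', '7', '9', '0', '3'] := rfl
theorem pvP7 : ("+7904" : String).toList = ['+', '7', '9', '0', '4'] := rfl
theorem pvP8 : ("+7905" : String).toList = ['+', '7', '9', '0', '5'] := rfl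
theorem pvP9 : ("+7906" : String).toList = ['+', '7', '9', '0', '6'] := rfl
theorem pvP10 : ("+7908" : String).toList = ['+', '7', '9', '0', '8'] := rfl
theorem pvP11 : ("+7909" : String).toList = ['+', '7', '9', '0', '9'] := rfl
theorem pvP12 : ("+7910" : String).toList = ['+', '7', '9', '1', '0'] := rfl
theorem pvP13 : ("+7913" : String).toList = ['+', '7', '9', '1', '3'] := rfl
theorem pvP14 : ("+7914" : String).toList = ['+', '7', '9', '1', '4'] := rfl
theorem pvP15 : ("+7915" : String).toList = ['+', '7', '9', '1', '5'] := rfl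
theorem pvP16 : ("+7916" : String).toList = ['+', '7', '9', '1', '6'] := rfl
theorem pvP17 : ("+7919" : String).toList = ['+', '7', '9', '1', '9'] := rfl
theorem pvP18 : ("+7950" : String).toList = ['+', '7', '9', '5', '0'] := rfl
theorem pvP19 : ("+7952" : String).toList = ['+', '7', '9', '5', '2'] := rfl
theorem pvP20 : ("+7953" : String).toList = ['+', '7', '9', '5', '3'] := rfl
theorem pvP21 : ("+7955" : String).toList = ['+', '7', '9', '5', '5'] := rfl
theorem pvP22 : ("+7957" : String).toList = ['+', '7', '9', '5', '7'] := rfl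
theorem pvP23 : ("+7958" : String).toList = ['+', '7', '9', '5', '8'] := rfl
theorem pvP24 : ("+7959" : String).toList = ['+', '7', '9', '5', '9'] := rfl
theorem pvP25 : ("+7960" : String).toList = ['+', '7', '9', '6', '0'] := rfl
theorem pvP26 : ("+7961" : String).toList = ['+', '7', '9', '6', '1'] := rfl
theorem pvP27 : ("+7962" : String).toList = ['+', '7', '9', '6', '2'] := rfl
theorem pvP28 : ("+7968" : String).toList = ['+', '7', '9', '6', '8'] := rfl
theorem pvP29 : ("+7969" : String).toList = ['+', '7', '9', '6', '9'] := rfl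
theorem pvP30 : ("+7977" : String).toList = ['+', '7', '9', '7', '7'] := rfl
theorem pvP31 : ("+7978" : String).toList = ['+', '7', '9', '7', '8'] := rfl
theorem pvP32 : ("+7984" : String).toList = ['+', '7', '9', '8', '4'] := rfl
theorem pvP33 : ("+7985" : String).toList = ['+', '7', '9', '8', '5'] := rfl
theorem pvP34 : ("+7986" : String).toList = ['+', '7', '9', '8', '6'] := rfl
theorem pvP35 : ("+7988" : String).toList = ['+', '7', '9', '8', '8'] := rfl
theorem pvP36 : ("+799" : String).toList = ['+', '7', '9', '9'] := rfl
theorem pvP37 : ("+7995" : String).toList = ['+', '7', '9', '9', '5'] := rfl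
theorem pvP38 : ("+7996" : String).toList = ['+', '7', '9', '9', '6'] := rfl
theorem pvP39 : ("+7999" : String).toList = ['+', '7', '9', '9', '9'] := rfl

theorem pvU0 : ("3115" : String).toList = ['3', '1', '1', '5'] := rfl
theorem pvU1 : ("3128" : String).toList = ['3', '1', '2', '8'] := rfl
theorem pvU2 : ("3242" : String).toList = ['3', '2', '4', '2'] := rfl
theorem pvU3 : ("3145" : String).toList = ['3', '1', '4', '5'] := rfl
theorem pvU4 : ("3235" : String).toList = ['3', '2', '3', '5'] := rfl
theorem pvU5 : ("3256" : String).toList = ['3', '2', '5', '6'] := rfl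
theorem pvU6 : ("3107" : String).toList = ['3', '1', '0', '7'] := rfl
theorem pvU7 : ("3125" : String).toList = ['3', '1', '2', '5'] := rfl
theorem pvU8 : ("3237" : String).toList = ['3', '2', '3', '7'] := rfl

theorem pv_sw (l : List Char) (s : String) :
    PySem.Str.startswith (String.ofList l) s = s.toList.isPrefixOf l := by
  simp [PySem.Str.startswith_eq, PySem.Chars.startswith]

theorem pv_case0 (cc : String) :
    get_detailed_carrier_info (String.ofList ([] : List Char)) cc = get_detailed_carrier_info_alt (String.ofList ([] : List Char)) cc := by
  rw [pv_alt_unfold, pv_sl6_0, pv_sl5_0, pv_sl4_0]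
  simp only [pv_table]
  simp only [get_detailed_carrier_info, pvMegafon, pvMts, pvBeeline, pvTele2, List.any_cons, List.any_nil, List.contains_cons, List.contains_nil, pvA0, pvA1, pvA2, pvA3, pvA4, pvA5, pvA6, pvA7, pvA8, pvA9, pvA10, pvA11, pvA12, pvA13, pvA14, pvA15, pvA16, pvA17, pvA18, pvA19, pvA20, pvA21, pvA22, pvA23, pvA24, pvA25, pvA26, pvA27, pvA28, pvA29, pvA30, pvA31, pvA32, pvA33, pvA34, pvA35, pvA36, pv_sw, pvP0, pvP1, pvP2, pvP3, pvP4, pvP5, pvP6, pvP7, pvP8, pvP9, pvP10, pvP11, pvP12, pvP13, pvP14, pvP15, pvP16, pvP17, pvP18, pvP19, pvP20, pvP21, pvP22, pvP23, pvP24, pvP25, pvP26, pvP27, pvP28, pvP29, pvP30, pvP31, pvP32, pvP33, pvP34, pvP35, pvP36, pvP37, pvP38, pvP39, pvU0, pvU1, pvU2, pvU3, pvU4, pvU5, pvU6, pvU7, pvU8, pv_ofList_beq, pvTableC, List.isPrefixOf, beq_iff_eq, List.cons.injEq]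
  simp [Bool.and_eq_true, beq_iff_eq, Bool.or_eq_true, List.isPrefixOf, pv_s26_0, pv_ofList_beq]
  try simp
  try (split_ifs <;> simp_all)

theorem pv_case1 (c0 : Char) (cc : String) :
    get_detailed_carrier_info (String.ofList [c0]) cc = get_detailed_carrier_info_alt (String.ofList [c0]) cc := by
  rw [pv_alt_unfold, pv_sl6_1, pv_sl5_1, pv_sl4_1]
  simp only [pv_table]
  simp only [get_detailed_carrier_info, pvMegafon, pvMts, pvBeeline, pvTele2, List.any_cons, List.any_nil, List.contains_cons, List.contains_nil, pvA0, pvA1, pvA2, pvA3, pvA4, pvA5, pvA6, pvA7, pvA8, pvA9, pvA10, pvA11, pvA12, pvA13, pvA14, pvA15, pvA16, pvA17, pvA18, pvA19, pvA20, pvA21, pvA22, pvA23, pvA24, pvA25, pvA26, pvA27, pvA28, pvA29, pvA30, pvA31, pvA32, pvA33, pvA34, pvA35, pvA36, pv_sw, pvP0, pvP1, pvP2, pvP3, pvP4, pvP5, pvP6, pvP7, pvP8, pvP9, pvP10, pvP11, pvP12, pvP13, pvP14, pvP15, pvP16, pvP17, pvP18, pvP19, pvP20, pvP21, pvP22, pvP23,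 pvP24, pvP25, pvP26, pvP27, pvP28, pvP29, pvP30, pvP31, pvP32, pvP33, pvP34, pvP35, pvP36, pvP37, pvP38, pvP39, pvU0, pvU1, pvU2, pvU3, pvU4, pvU5, pvU6, pvU7, pvU8, pv_ofList_beq, pvTableC, List.isPrefixOf, beq_iff_eq, List.cons.injEq]
  simp [Bool.and_eq_true, beq_iff_eq, Bool.or_eq_true, List.isPrefixOf, pv_s26_1, pv_ofList_beq]
  try simp
  try (split_ifs <;> simp_all)

theorem pv_case2 (c0 : Char) (c1 : Char) (cc : String) :
    get_detailed_carrier_info (String.ofList [c0, c1]) cc = get_detailed_carrier_info_alt (String.ofList [c0, c1]) cc := by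
  rw [pv_alt_unfold, pv_sl6_2, pv_sl5_2, pv_sl4_2]
  simp only [pv_table]
  simp only [get_detailed_carrier_info, pvMegafon, pvMts, pvBeeline, pvTele2, List.any_cons, List.any_nil, List.contains_cons, List.contains_nil, pvA0, pvA1, pvA2, pvA3, pvA4, pvA5, pvA6, pvA7, pvA8, pvA9, pvA10, pvA11, pvA12, pvA13, pvA14, pvA15, pvA16, pvA17, pvA18, pvA19, pvA20, pvA21, pvA22, pvA23, pvA24, pvA25, pvA26, pvA27, pvA28, pvA29, pvA30, pvA31, pvA32, pvA33, pvA34, pvA35, pvA36, pv_sw, pvP0, pvP1, pvP2, pvP3, pvP4, pvP5, pvP6, pvP7, pvP8, pvP9, pvP10, pvP11, pvP12, pvP13, pvP14, pvP15, pvP16, pvP17, pvP18, pvP19, pvP20, pvP21, pvP22, pvP23, pvP24, pvP25, pvP26, pvP27, pvP28, pvP29, pvP30, pvP31, pvP32, pvP33, pvP34, pvP35, pvP36, pvP37, pvP38, pvP39, pvU0, pvU1, pvU2, pvU3, pvU4, pvU5, pvU6, pvU7, pvU8, pv_ofList_beq, pvTableC, List.isPrefixOf, beq_iff_eq, List.c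ons.injEq]
  simp [Bool.and_eq_true, beq_iff_eq, Bool.or_eq_true, List.isPrefixOf, pv_s26_2, pv_ofList_beq]
  try simp
  try (split_ifs <;> simp_all)

theorem pv_case3 (c0 : Char) (c1 : Char) (c2 : Char) (cc : String) :
    get_detailed_carrier_info (String.ofList [c0, c1, c2]) cc = get_detailed_carrier_info_alt (String.ofList [c0, c1, c2]) cc := by
  rw [pv_alt_unfold, pv_sl6_3, pv_sl5_3, pv_sl4_3]
  simp only [pv_table]
  simp only [get_detailed_carrier_info, pvMegafon, pvMts, pvBeeline, pvTele2, List.any_cons, List.any_nil, List.contains_cons, List.contains_nil, pvA0, pvA1, pvA2, pvA3, pvA4, pvA5, pvA6, pvA7, pvA8, pvA9, pvA10, pvA11, pvA12, pvA13, pvA14, pvA15, pvA16, pvA17, pvA18, pvA19, pvA20, pvA21, pvA22, pvA23, pvA24, pvA25, pvA26, pvA27, pvA28, pvA29, pvA30, pvA31, pvA32, pvA33, pvA34, pvA35, pvA36, pv_sw, pvP0, pvP1, pvP2, pvP3, pvP4, pvP5, pvP6, pvP7, pvP8, pvP9, pvP10, pvP11, pvP12, pvP13, pvP14, pvP15, pvP16,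 pvP17, pvP18, pvP19, pvP20, pvP21, pvP22, pvP23, pvP24, pvP25, pvP26, pvP27, pvP28, pvP29, pvP30, pvP31, pvP32, pvP33, pvP34, pvP35, pvP36, pvP37, pvP38, pvP39, pvU0, pvU1, pvU2, pvU3, pvU4, pvU5, pvU6, pvU7, pvU8, pv_ofList_beq, pvTableC, List.isPrefixOf, beq_iff_eq, List.cons.injEq]
  simp [Bool.and_eq_true, beq_iff_eq, Bool.or_eq_true, List.isPrefixOf, pv_s26_3, pv_ofList_beq]
  try simp
  try (split_ifs <;> simp_all)

theorem pv_case4 (c0 : Char) (c1 : Char) (c2 : Char) (c3 : Char) (cc : String) :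
    get_detailed_carrier_info (String.ofList [c0, c1, c2, c3]) cc = get_detailed_carrier_info_alt (String.ofList [c0, c1, c2, c3]) cc := by
  rw [pv_alt_unfold, pv_sl6_4, pv_sl5_4, pv_sl4_4]
  simp only [pv_table]
  simp only [get_detailed_carrier_info, pvMegafon, pvMts, pvBeeline, pvTele2, List.any_cons, List.any_nil, List.contains_cons, List.contains_nil, pvA0, pvA1, pvA2, pvA3, pvA4, pvA5, pvA6, pvA7, pvA8, pvA9, pvA10, pvA11, pvA12, pvA13, pvA14, pvA15, pvA16, pvA17, pvA18, pvA19, pvA20, pvA21, pvA22, pvA23, pvA24, pvA25, pvA26, pvA27, pvA28, pvA29, pvA30, pvA31, pvA32, pvA33, pvA34, pvA35, pvA36, pv_sw, pvP0, pvP1, pvP2, pvP3, pvP4, pvP5, pvP6, pvP7, pvP8, pvP9, pvP10, pvP11, pvP12, pvP13, pvP14, pvP15, pvP16, pvP17, pvP18, pvP19, pvP20, pvP21, pvP22, pvP23, pvP24, pvP25, pvP26, pvP27, pvP28, pvP29, pvP30, pvP31, pvP32, pvP33, pvP34, pvP35, pvP36, pvP37, pvP38, pvP39, pvU0, pvU1,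 pvU2, pvU3, pvU4, pvU5, pvU6, pvU7, pvU8, pv_ofList_beq, pvTableC, List.isPrefixOf, beq_iff_eq, List.cons.injEq]
  simp [Bool.and_eq_true, beq_iff_eq, Bool.or_eq_true, List.isPrefixOf, pv_s26_4, pv_ofList_beq]
  by_cases h0 : ('+' : Char) = c0
  case neg => simp [h0]
  subst h0
  by_cases h1 : ('7' : Char) = c1
  · subst h1
    by_cases h2 : ('9' : Char) = c2
    · subst h2
      by_cases k36 : ('9' : Char) = c3
      · subst k36; simp
      · simp [k36]
    · by_cases h8 : ('8' : Char) = c2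
      · subst h8
        simp [h2]
      · simp [h2, h8]
  · by_cases hb : ('1' : Char) = c1
    · subst hb
      simp
    · simp [h1, hb]

theorem pv_case5 (c0 : Char) (c1 : Char) (c2 : Char) (c3 : Char) (c4 : Char) (cc : String) :
    get_detailed_carrier_info (String.ofList [c0, c1, c2, c3, c4]) cc = get_detailed_carrier_info_alt (String.ofList [c0, c1, c2, c3, c4]) cc := by
  rw [pv_alt_unfold, pv_sl6_5, pv_sl5_5, pv_sl4_5]
  simp only [pv_table]
  simp only [get_detailed_carrier_info, pvMegafon, pvMts, pvBeeline, pvTele2, List.any_cons, List.any_nil, List.contains_cons, List.contains_nil, pvA0, pvA1, pvA2, pvA3, pvA4, pvA5, pvA6, pvA7, pvA8, pvA9, pvA10, pvA11, pvA12, pvA13, pvA14, pvA15, pvA16, pvA17, pvA18, pvA19, pvA20, pvA21, pvA22, pvA23, pvA24, pvA25, pvA26, pvA27, pvA28, pvA29, pvA30, pvA31, pvA32, pvA33, pvA34, pvA35, pvA36, pv_sw, pvP0, pvP1, pvP2, pvP3, pvP4, pvP5, pvP6, pvP7, pvP8, pvP9, pvP10, pvP11, pvP12, pvP13, pvP14,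 pvP15, pvP16, pvP17, pvP18, pvP19, pvP20, pvP21, pvP22, pvP23, pvP24, pvP25, pvP26, pvP27, pvP28, pvP29, pvP30, pvP31, pvP32, pvP33, pvP34, pvP35, pvP36, pvP37, pvP38, pvP39, pvU0, pvU1, pvU2, pvU3, pvU4, pvU5, pvU6, pvU7, pvU8, pv_ofList_beq, pvTableC, List.isPrefixOf, beq_iff_eq, List.cons.injEq]
  simp [Bool.and_eq_true, beq_iff_eq, Bool.or_eq_true, List.isPrefixOf, pv_s26_5, pv_ofList_beq]
  by_cases h0 : ('+' : Char) = c0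
  case neg => simp [h0]
  subst h0
  by_cases h1 : ('7' : Char) = c1
  · subst h1
    by_cases h2 : ('9' : Char) = c2
    · subst h2
      by_cases k0 : ('0' : Char) = c3 ∧ ('0' : Char) = c4
      · obtain ⟨ka, kb⟩ := k0; subst ka; subst kb; simp
      by_cases k1 : ('0' : Char) = c3 ∧ ('2' : Char) = c4
      · obtain ⟨ka, kb⟩ := k1; subst ka; subst kb; simp
      by_cases k2 : ('0' : Char) = c3 ∧ ('4' : Char) = c4
      · obtain ⟨ka, kb⟩ := k2; subst ka; subst kb; simp
      by_cases k3 : ('0' : Char) = c3 ∧ ('8' : Char) = c4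
      · obtain ⟨ka, kb⟩ := k3; subst ka; subst kb; simp
      by_cases k4 : ('5' : Char) = c3 ∧ ('0' : Char) = c4
      · obtain ⟨ka, kb⟩ := k4; subst ka; subst kb; simp
      by_cases k5 : ('6' : Char) = c3 ∧ ('2' : Char) = c4
      · obtain ⟨ka, kb⟩ := k5; subst ka; subst kb; simp
      by_cases k6 : ('6' : Char) = c3 ∧ ('9' : Char) = c4
      · obtain ⟨ka, kb⟩ := k6; subst ka; subst kb; simp
      by_cases k7 : ('7' : Char) = c3 ∧ ('7' : Char) = c4
      · obtain ⟨ka, kb⟩ := k7; subst ka; subst kb; simp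
      by_cases k8 : ('8' : Char) = c3 ∧ ('5' : Char) = c4
      · obtain ⟨ka, kb⟩ := k8; subst ka; subst kb; simp
      by_cases k9 : ('8' : Char) = c3 ∧ ('6' : Char) = c4
      · obtain ⟨ka, kb⟩ := k9; subst ka; subst kb; simp
      by_cases k10 : ('8' : Char) = c3 ∧ ('8' : Char) = c4
      · obtain ⟨ka, kb⟩ := k10; subst ka; subst kb; simp
      by_cases k11 : ('0' : Char) = c3 ∧ ('1' : Char) = c4
      · obtain ⟨ka, kb⟩ := k11; subst ka; subst kb; simp
      by_cases k12 : ('1' : Char) = c3 ∧ ('0' : Char) = c4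
      · obtain ⟨ka, kb⟩ := k12; subst ka; subst kb; simp
      by_cases k13 : ('1' : Char) = c3 ∧ ('3' : Char) = c4
      · obtain ⟨ka, kb⟩ := k13; subst ka; subst kb; simp
      by_cases k14 : ('1' : Char) = c3 ∧ ('4' : Char) = c4
      · obtain ⟨ka, kb⟩ := k14; subst ka; subst kb; simp
      by_cases k15 : ('1' : Char) = c3 ∧ ('5' : Char) = c4
      · obtain ⟨ka, kb⟩ := k15; subst ka; subst kb; simp
      by_cases k16 : ('1' : Char) = c3 ∧ ('6' : Char) = c4
      · obtain ⟨ka, kb⟩ := k16; subst ka; subst kb; simp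
      by_cases k17 : ('1' : Char) = c3 ∧ ('9' : Char) = c4
      · obtain ⟨ka, kb⟩ := k17; subst ka; subst kb; simp
      by_cases k18 : ('6' : Char) = c3 ∧ ('8' : Char) = c4
      · obtain ⟨ka, kb⟩ := k18; subst ka; subst kb; simp
      by_cases k19 : ('8' : Char) = c3 ∧ ('4' : Char) = c4
      · obtain ⟨ka, kb⟩ := k19; subst ka; subst kb; simp
      by_cases k20 : ('0' : Char) = c3 ∧ ('3' : Char) = c4
      · obtain ⟨ka, kb⟩ := k20; subst ka; subst kb; simp
      by_cases k21 : ('0' : Char) = c3 ∧ ('5' : Char) = c4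
      · obtain ⟨ka, kb⟩ := k21; subst ka; subst kb; simp
      by_cases k22 : ('0' : Char) = c3 ∧ ('6' : Char) = c4
      · obtain ⟨ka, kb⟩ := k22; subst ka; subst kb; simp
      by_cases k23 : ('0' : Char) = c3 ∧ ('9' : Char) = c4
      · obtain ⟨ka, kb⟩ := k23; subst ka; subst kb; simp
      by_cases k24 : ('6' : Char) = c3 ∧ ('0' : Char) = c4
      · obtain ⟨ka, kb⟩ := k24; subst ka; subst kb; simp
      by_cases k25 : ('6' : Char) = c3 ∧ ('1' : Char) = c4
      · obtain ⟨ka, kb⟩ := k25; subst ka; subst kb; simp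
      by_cases k26 : ('9' : Char) = c3 ∧ ('5' : Char) = c4
      · obtain ⟨ka, kb⟩ := k26; subst ka; subst kb; simp
      by_cases k27 : ('9' : Char) = c3 ∧ ('6' : Char) = c4
      · obtain ⟨ka, kb⟩ := k27; subst ka; subst kb; simp
      by_cases k28 : ('9' : Char) = c3 ∧ ('9' : Char) = c4
      · obtain ⟨ka, kb⟩ := k28; subst ka; subst kb; simp
      by_cases k29 : ('5' : Char) = c3 ∧ ('2' : Char) = c4
      · obtain ⟨ka, kb⟩ := k29; subst ka; subst kb; simp
      by_cases k30 : ('5' : Char) = c3 ∧ ('3' : Char) = c4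
      · obtain ⟨ka, kb⟩ := k30; subst ka; subst kb; simp
      by_cases k31 : ('5' : Char) = c3 ∧ ('5' : Char) = c4
      · obtain ⟨ka, kb⟩ := k31; subst ka; subst kb; simp
      by_cases k32 : ('5' : Char) = c3 ∧ ('7' : Char) = c4
      · obtain ⟨ka, kb⟩ := k32; subst ka; subst kb; simp
      by_cases k33 : ('5' : Char) = c3 ∧ ('8' : Char) = c4
      · obtain ⟨ka, kb⟩ := k33; subst ka; subst kb; simp
      by_cases k34 : ('5' : Char) = c3 ∧ ('9' : Char) = c4
      · obtain ⟨ka, kb⟩ := k34; subst ka; subst kb; simp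
      by_cases k35 : ('7' : Char) = c3 ∧ ('8' : Char) = c4
      · obtain ⟨ka, kb⟩ := k35; subst ka; subst kb; simp
      by_cases k36 : ('9' : Char) = c3
      · subst k36
        by_cases b1 : ('5' : Char) = c4
        · subst b1; simp
        by_cases b2 : ('6' : Char) = c4
        · subst b2; simp
        by_cases b3 : ('9' : Char) = c4
        · subst b3; simp
        simp [b1, b2, b3]
      simp [k0, k1, k2, k3, k4, k5, k6, k7, k8, k9, k10, k11, k12, k13, k14, k15, k16, k17, k18, k19, k20, k21, k22, k23, k24, k25, k26, k27, k28, k29, k30, k31, k32, k33, k34, k35, k36]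
    · by_cases h8 : ('8' : Char) = c2
      · subst h8
        by_cases t0 : ('0' : Char) = c3 ∧ ('0' : Char) = c4
        · obtain ⟨ta, tb⟩ := t0; subst ta; subst tb; simp [h2]
        · simp [h2, t0]
      · simp [h2, h8]
  · by_cases hb : ('1' : Char) = c1
    · subst hb
      simp
    · simp [h1, hb]

theorem pv_case6 (c0 : Char) (c1 : Char) (c2 : Char) (c3 : Char) (c4 : Char) (c5 : Char) (r : List Char) (cc : String) :
    get_detailed_carrier_info (String.ofList (c0::c1::c2::c3::c4::c5::r)) cc = get_detailed_carrier_info_alt (String.ofList (c0::c1::c2::c3::c4::c5::r)) cc := by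
  rw [pv_alt_unfold, pv_sl6_6, pv_sl5_6, pv_sl4_6]
  simp only [pv_table]
  simp only [get_detailed_carrier_info, pvMegafon, pvMts, pvBeeline, pvTele2, List.any_cons, List.any_nil, List.contains_cons, List.contains_nil, pvA0, pvA1, pvA2, pvA3, pvA4, pvA5, pvA6, pvA7, pvA8, pvA9, pvA10, pvA11, pvA12, pvA13, pvA14, pvA15, pvA16, pvA17, pvA18, pvA19, pvA20, pvA21, pvA22, pvA23, pvA24, pvA25, pvA26, pvA27, pvA28, pvA29, pvA30, pvA31, pvA32, pvA33, pvA34, pvA35, pvA36, pv_sw, pvP0, pvP1, pvP2, pvP3, pvP4, pvP5, pvP6, pvP7, pvP8, pvP9, pvP10, pvP11, pvP12, pvP13, pvP14, pvP15, pvP16, pvP17, pvP18, pvP19, pvP20, pvP21, pvP22, pvP23, pvP24, pvP25, pvP26, pvP27, pvP28, pvP29, pvP30, pvP31, pvP32, pvP33, pvP34, pvP35, pvP36, pvP37, pvP38, pvP39, pvU0, pvU1, pvU2, pvU3, pvU4, pvU5, pvU6, pvU7, pvU8, pv_ofList_beq, pvTableC, List.isPrefixOf, beq_iff_eq, List.c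ons.injEq]
  simp [Bool.and_eq_true, beq_iff_eq, Bool.or_eq_true, List.isPrefixOf, pv_s26_6, pv_ofList_beq]
  by_cases h0 : ('+' : Char) = c0
  case neg => simp [h0]
  subst h0
  by_cases h1 : ('7' : Char) = c1
  · subst h1
    by_cases h2 : ('9' : Char) = c2
    · subst h2
      by_cases k0 : ('0' : Char) = c3 ∧ ('0' : Char) = c4
      · obtain ⟨ka, kb⟩ := k0; subst ka; subst kb; simp
      by_cases k1 : ('0' : Char) = c3 ∧ ('2' : Char) = c4
      · obtain ⟨ka, kb⟩ := k1; subst ka; subst kb; simp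
      by_cases k2 : ('0' : Char) = c3 ∧ ('4' : Char) = c4
      · obtain ⟨ka, kb⟩ := k2; subst ka; subst kb; simp
      by_cases k3 : ('0' : Char) = c3 ∧ ('8' : Char) = c4
      · obtain ⟨ka, kb⟩ := k3; subst ka; subst kb; simp
      by_cases k4 : ('5' : Char) = c3 ∧ ('0' : Char) = c4
      · obtain ⟨ka, kb⟩ := k4; subst ka; subst kb; simp
      by_cases k5 : ('6' : Char) = c3 ∧ ('2' : Char) = c4
      · obtain ⟨ka, kb⟩ := k5; subst ka; subst kb; simp
      by_cases k6 : ('6' : Char) = c3 ∧ ('9' : Char) = c4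
      · obtain ⟨ka, kb⟩ := k6; subst ka; subst kb; simp
      by_cases k7 : ('7' : Char) = c3 ∧ ('7' : Char) = c4
      · obtain ⟨ka, kb⟩ := k7; subst ka; subst kb; simp
      by_cases k8 : ('8' : Char) = c3 ∧ ('5' : Char) = c4
      · obtain ⟨ka, kb⟩ := k8; subst ka; subst kb; simp
      by_cases k9 : ('8' : Char) = c3 ∧ ('6' : Char) = c4
      · obtain ⟨ka, kb⟩ := k9; subst ka; subst kb; simp
      by_cases k10 : ('8' : Char) = c3 ∧ ('8' : Char) = c4
      · obtain ⟨ka, kb⟩ := k10; subst ka; subst kb; simp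
      by_cases k11 : ('0' : Char) = c3 ∧ ('1' : Char) = c4
      · obtain ⟨ka, kb⟩ := k11; subst ka; subst kb; simp
      by_cases k12 : ('1' : Char) = c3 ∧ ('0' : Char) = c4
      · obtain ⟨ka, kb⟩ := k12; subst ka; subst kb; simp
      by_cases k13 : ('1' : Char) = c3 ∧ ('3' : Char) = c4
      · obtain ⟨ka, kb⟩ := k13; subst ka; subst kb; simp
      by_cases k14 : ('1' : Char) = c3 ∧ ('4' : Char) = c4
      · obtain ⟨ka, kb⟩ := k14; subst ka; subst kb; simp
      by_cases k15 : ('1' : Char) = c3 ∧ ('5' : Char) = c4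
      · obtain ⟨ka, kb⟩ := k15; subst ka; subst kb; simp
      by_cases k16 : ('1' : Char) = c3 ∧ ('6' : Char) = c4
      · obtain ⟨ka, kb⟩ := k16; subst ka; subst kb; simp
      by_cases k17 : ('1' : Char) = c3 ∧ ('9' : Char) = c4
      · obtain ⟨ka, kb⟩ := k17; subst ka; subst kb; simp
      by_cases k18 : ('6' : Char) = c3 ∧ ('8' : Char) = c4
      · obtain ⟨ka, kb⟩ := k18; subst ka; subst kb; simp
      by_cases k19 : ('8' : Char) = c3 ∧ ('4' : Char) = c4
      · obtain ⟨ka, kb⟩ := k19; subst ka; subst kb; simp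
      by_cases k20 : ('0' : Char) = c3 ∧ ('3' : Char) = c4
      · obtain ⟨ka, kb⟩ := k20; subst ka; subst kb; simp
      by_cases k21 : ('0' : Char) = c3 ∧ ('5' : Char) = c4
      · obtain ⟨ka, kb⟩ := k21; subst ka; subst kb; simp
      by_cases k22 : ('0' : Char) = c3 ∧ ('6' : Char) = c4
      · obtain ⟨ka, kb⟩ := k22; subst ka; subst kb; simp
      by_cases k23 : ('0' : Char) = c3 ∧ ('9' : Char) = c4
      · obtain ⟨ka, kb⟩ := k23; subst ka; subst kb; simp
      by_cases k24 : ('6' : Char) = c3 ∧ ('0' : Char) = c4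
      · obtain ⟨ka, kb⟩ := k24; subst ka; subst kb; simp
      by_cases k25 : ('6' : Char) = c3 ∧ ('1' : Char) = c4
      · obtain ⟨ka, kb⟩ := k25; subst ka; subst kb; simp
      by_cases k26 : ('9' : Char) = c3 ∧ ('5' : Char) = c4
      · obtain ⟨ka, kb⟩ := k26; subst ka; subst kb; simp
      by_cases k27 : ('9' : Char) = c3 ∧ ('6' : Char) = c4
      · obtain ⟨ka, kb⟩ := k27; subst ka; subst kb; simp
      by_cases k28 : ('9' : Char) = c3 ∧ ('9' : Char) = c4
      · obtain ⟨ka, kb⟩ := k28; subst ka; subst kb; simp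
      by_cases k29 : ('5' : Char) = c3 ∧ ('2' : Char) = c4
      · obtain ⟨ka, kb⟩ := k29; subst ka; subst kb; simp
      by_cases k30 : ('5' : Char) = c3 ∧ ('3' : Char) = c4
      · obtain ⟨ka, kb⟩ := k30; subst ka; subst kb; simp
      by_cases k31 : ('5' : Char) = c3 ∧ ('5' : Char) = c4
      · obtain ⟨ka, kb⟩ := k31; subst ka; subst kb; simp
      by_cases k32 : ('5' : Char) = c3 ∧ ('7' : Char) = c4
      · obtain ⟨ka, kb⟩ := k32; subst ka; subst kb; simp
      by_cases k33 : ('5' : Char) = c3 ∧ ('8' : Char) = c4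
      · obtain ⟨ka, kb⟩ := k33; subst ka; subst kb; simp
      by_cases k34 : ('5' : Char) = c3 ∧ ('9' : Char) = c4
      · obtain ⟨ka, kb⟩ := k34; subst ka; subst kb; simp
      by_cases k35 : ('7' : Char) = c3 ∧ ('8' : Char) = c4
      · obtain ⟨ka, kb⟩ := k35; subst ka; subst kb; simp
      by_cases k36 : ('9' : Char) = c3
      · subst k36
        by_cases b1 : ('5' : Char) = c4
        · subst b1; simp
        by_cases b2 : ('6' : Char) = c4
        · subst b2; simp
        by_cases b3 : ('9' : Char) = c4
        · subst b3; simp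
        simp [b1, b2, b3]
      simp [k0, k1, k2, k3, k4, k5, k6, k7, k8, k9, k10, k11, k12, k13, k14, k15, k16, k17, k18, k19, k20, k21, k22, k23, k24, k25, k26, k27, k28, k29, k30, k31, k32, k33, k34, k35, k36]
    · by_cases h8 : ('8' : Char) = c2
      · subst h8
        by_cases t0 : ('0' : Char) = c3 ∧ ('0' : Char) = c4
        · obtain ⟨ta, tb⟩ := t0; subst ta; subst tb; simp [h2]
        · simp [h2, t0]
      · simp [h2, h8]
  · by_cases hb : ('1' : Char) = c1
    · subst hb
      by_cases m0 : ('3' : Char) = c2 ∧ ('1' : Char) = c3 ∧ ('1' : Char) = c4 ∧ ('5' : Char) = c5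
      · obtain ⟨ma, mb, mc, md⟩ := m0; subst ma; subst mb; subst mc; subst md; simp
      by_cases m1 : ('3' : Char) = c2 ∧ ('1' : Char) = c3 ∧ ('2' : Char) = c4 ∧ ('8' : Char) = c5
      · obtain ⟨ma, mb, mc, md⟩ := m1; subst ma; subst mb; subst mc; subst md; simp
      by_cases m2 : ('3' : Char) = c2 ∧ ('2' : Char) = c3 ∧ ('4' : Char) = c4 ∧ ('2' : Char) = c5
      · obtain ⟨ma, mb, mc, md⟩ := m2; subst ma; subst mb; subst mc; subst md; simp
      by_cases m3 : ('3' : Char) = c2 ∧ ('1' : Char) = c3 ∧ ('4' : Char) = c4 ∧ ('5' : Char) = c5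
      · obtain ⟨ma, mb, mc, md⟩ := m3; subst ma; subst mb; subst mc; subst md; simp
      by_cases m4 : ('3' : Char) = c2 ∧ ('2' : Char) = c3 ∧ ('3' : Char) = c4 ∧ ('5' : Char) = c5
      · obtain ⟨ma, mb, mc, md⟩ := m4; subst ma; subst mb; subst mc; subst md; simp
      by_cases m5 : ('3' : Char) = c2 ∧ ('2' : Char) = c3 ∧ ('5' : Char) = c4 ∧ ('6' : Char) = c5
      · obtain ⟨ma, mb, mc, md⟩ := m5; subst ma; subst mb; subst mc; subst md; simp
      by_cases m6 : ('3' : Char) = c2 ∧ ('1' : Char) = c3 ∧ ('0' : Char) = c4 ∧ ('7' : Char) = c5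
      · obtain ⟨ma, mb, mc, md⟩ := m6; subst ma; subst mb; subst mc; subst md; simp
      by_cases m7 : ('3' : Char) = c2 ∧ ('1' : Char) = c3 ∧ ('2' : Char) = c4 ∧ ('5' : Char) = c5
      · obtain ⟨ma, mb, mc, md⟩ := m7; subst ma; subst mb; subst mc; subst md; simp
      by_cases m8 : ('3' : Char) = c2 ∧ ('2' : Char) = c3 ∧ ('3' : Char) = c4 ∧ ('7' : Char) = c5
      · obtain ⟨ma, mb, mc, md⟩ := m8; subst ma; subst mb; subst mc; subst md; simp
      simp [m0, m1, m2, m3, m4, m5, m6, m7, m8]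
    · simp [h1, hb]

set_option maxHeartbeats 4000000 in
set_option maxRecDepth 16384 in
theorem pv_key (l : List Char) (cc : String) :
    get_detailed_carrier_info (String.ofList l) cc = get_detailed_carrier_info_alt (String.ofList l) cc := by
  rcases l with _|⟨c0,_|⟨c1,_|⟨c2,_|⟨c3,_|⟨c4,_|⟨c5,r⟩⟩⟩⟩⟩⟩
  · exact pv_case0 cc
  · exact pv_case1 c0 cc
  · exact pv_case2 c0 c1 cc
  · exact pv_case3 c0 c1 c2 cc
  · exact pv_case4 c0 c1 c2 c3 cc
  · exact pv_case5 c0 c1 c2 c3 c4 cc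
  · exact pv_case6 c0 c1 c2 c3 c4 c5 r cc

-- ===== VERDICT (by name: the statement is the Claim_ definition above) =====
theorem get_detailed_carrier_info_spec : Claim_equal_get_detailed_carrier_info := by
  intro phone cc _
  unfold Spec_get_detailed_carrier_info
  rw [show phone = String.ofList phone.toList from (pv_eq_ofList phone phone.toList rfl)]
  exact pv_key phone.toList cc
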